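-- pv_equiv track=rewrite | github.com/MAEA2/NLP100 | prob_05.py | word_ngram
-- ===== SOURCE A (Python) =====
-- def word_ngram(s,n):
--     s=s.replace(",","")
--     s=s.replace(".","")
--     sw=s.split(" ")
--     ngram=[]
--     for i in range(len(sw)-n+1):
--         chank=""
--         for j in range(i,i+n):
--             if(j==i+n-1):
--                 chank+=sw[j]
--             else:
--                 chank+=sw[j]+" "
--         ngram.append(chank)
--     return ngram
-- ===== SOURCE B (Python) =====
-- def word_ngram(s, n):
--     s = s.replace(",", "").replace(".", "")
--     sw = s.split(" ")
--     if n > len(sw):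
--         return []
--     return [" ".join(t) for t in zip(*(sw[i:] for i in range(n)))]
-- ===== Notes on version B (the rewrite author's own statement) =====
-- stated objective: idiomatic
-- what changed: Replaces the index-range outer loop with an inner string-concatenation loop by the parallel-shift idiom: zip n shifted copies of the word list and ' '.join each tuple (an n > len(sw) guard returns [] without building the shifts).
-- intended difference: For n <= 0 A returns a list of len(sw)-n+1 empty strings (an artefact of its empty inner loop and inclusive outer range), while B returns [], the intended answer since there are no n-grams of non-positive order. — e.g. on word_ngram("a", 0): A returns ["", ""], B returns []
import Mathlib
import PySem

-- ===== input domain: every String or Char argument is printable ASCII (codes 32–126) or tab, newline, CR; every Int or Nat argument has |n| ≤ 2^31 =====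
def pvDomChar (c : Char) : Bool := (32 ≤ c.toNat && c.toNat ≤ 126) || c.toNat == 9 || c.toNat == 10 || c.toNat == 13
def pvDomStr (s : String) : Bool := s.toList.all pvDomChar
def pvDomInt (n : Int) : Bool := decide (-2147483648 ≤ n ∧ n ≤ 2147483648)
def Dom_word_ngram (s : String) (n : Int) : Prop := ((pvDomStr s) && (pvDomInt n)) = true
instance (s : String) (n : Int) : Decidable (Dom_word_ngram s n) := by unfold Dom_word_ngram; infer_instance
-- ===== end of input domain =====

-- B builds the n-grams by zipping n shifted copies of the word list (the parallel-shift idiom)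
-- instead of A's index-range outer loop with an inner string-concatenation loop (objective: idiomatic).


-- ===== PORT A =====
-- indices j of the inner loop are provably in range, so sw[j] is ported as pyGetD (the default is never read)
def word_ngram (s : String) (n : Int) : List String :=
  let s1 := PySem.Str.replace s "," ""
  let s2 := PySem.Str.replace s1 "." ""
  let sw := (PySem.Str.split? s2 " ").getD []
  (PySem.List.pyRange 0 ((sw.length : Int) - n + 1) 1).foldl (fun ngram i =>
    let chank := (PySem.List.pyRange i (i + n) 1).foldl (fun chank j =>
      if j = i + n - 1 then chank ++ PySem.List.pyGetD sw j ""
      else chank ++ PySem.List.pyGetD sw j "" ++ " ") ""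
    ngram ++ [chank]) []

-- ===== PORT B =====
-- zip(*iterables): advance all sequences in lock-step, stop as soon as any is exhausted
-- (structural recursion on the first sequence; `pyZipNGo` is zip's engine for ≥ 1 sequences)
def pyZipNGo {α : Type} [Inhabited α] : List α → List (List α) → List (List α)
  | [], _ => []
  | x :: xs, rest =>
      if rest.any (·.isEmpty) then []
      else (x :: rest.map (·.headI)) :: pyZipNGo xs (rest.map (·.tail))

def pyZipN {α : Type} [Inhabited α] : List (List α) → List (List α)
  | [] => []
  | l :: rest => pyZipNGo l rest

def word_ngram_alt (s : String) (n : Int) : List String :=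
  let sw := (PySem.Str.split? (PySem.Str.replace (PySem.Str.replace s "," "") "." "") " ").getD []
  if (sw.length : Int) < n then []
  else
    let shifts := (PySem.List.pyRange 0 n 1).map (fun i => PySem.List.slice sw (some i) none)
    (pyZipN shifts).map (fun t => PySem.Str.join " " t)

-- ===== PRECONDITION & SPEC =====
-- For n <= 0, A returns a list of len(sw)-n+1 empty strings (an artefact of its empty inner
-- loop and inclusive outer range), while B returns [], the intended answer since there are
-- no n-grams of non-positive order.
def D_word_ngram (s : String) (n : Int) : Prop := n ≤ 0
instance (s : String) (n : Int) : Decidable (D_word_ngram s n) := by unfold D_word_ngram; infer_instance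

def Spec_word_ngram (s : String) (n : Int) (out : List String) : Prop := ¬ D_word_ngram s n → out = word_ngram_alt s n
instance (s : String) (n : Int) (out : List String) : Decidable (Spec_word_ngram s n out) := by unfold Spec_word_ngram; infer_instance

def pvDiffWitness_word_ngram : String × Int := ("a", 0)
def pvDiffWitnessOut_word_ngram : (List String) × (List String) := (["", ""], [])

-- ===== CLAIM (what is proved, stated in full; the proofs are below) =====
def Claim_unchanged_word_ngram : Prop := ∀ (s : String) (n : Int), Dom_word_ngram s n → Spec_word_ngram s n (word_ngram s n)
def Claim_changed_word_ngram : Prop := Dom_word_ngram (pvDiffWitness_word_ngram.1) (pvDiffWitness_word_ngram.2) ∧ D_word_ngram (pvDiffWitness_word_ngram.1) (pvDiffWitness_word_ngram.2) ∧ word_ngram (pvDiffWitness_word_ngram.1) (pvDiffWitness_word_ngram.2) = pvDiffWitnessOut_word_ngram.1 ∧ word_ngram_alt (pvDiffWitness_word_ngram.1) (pvDiffWitness_word_ngram.2) = pvDiffWitnessOut_word_ngram.2 ∧ pvDiffWitnessOut_word_ngram.1 ≠ pvDiffWitnessOut_word_ngram.2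
def Claim_exact_word_ngram : Prop := ∀ (s : String) (n : Int), Dom_word_ngram s n → D_word_ngram s n → word_ngram s n ≠ word_ngram_alt s n

-- ===== LEMMAS AND PROOFS =====

-- "" ++ x = x and x ++ "" ++ sep chains, handled on the list side
lemma str_empty_append (x : String) : ("" : String) ++ x = x := by
  apply String.toList_inj.mp; simp

lemma str_join_cons_cons (sep x y : String) (t : List String) :
    PySem.Str.join sep (x :: y :: t) = x ++ sep ++ PySem.Str.join sep (y :: t) := by
  apply String.toList_inj.mp
  simp [PySem.Str.toList_join, PySem.Chars.join_cons_cons]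

lemma str_join_singleton (sep x : String) : PySem.Str.join sep [x] = x := by
  apply String.toList_inj.mp
  simp [PySem.Str.toList_join, PySem.Chars.join_singleton]

-- heads of the shifted copies of ws are the first k words of ws
lemma heads_of_shifts {α : Type} [Inhabited α] (ws : List α) :
    ∀ k : Nat, k ≤ ws.length →
      (List.range k).map (fun i => (ws.drop i).headI) = ws.take k := by
  induction ws with
  | nil =>
      intro k hk
      have hk0 : k = 0 := by simpa using hk
      subst hk0; simp
  | cons x xs ih =>
      intro k hk
      cases k with
      | zero => simp
      | succ j =>
          have h1 : ∀ i ∈ List.range j,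
              ((fun i => ((x :: xs).drop i).headI) ∘ Nat.succ) i = (fun i => (xs.drop i).headI) i := by
            intro i _; simp
          rw [List.range_succ_eq_map, List.map_cons, List.map_map, List.map_congr_left h1]
          rw [ih j (by simpa using hk)]
          simp

-- zip's engine on the family ws, ws[1:], …, ws[k:] yields the (k+1)-windows of ws
lemma go_shifts {α : Type} [Inhabited α] (ws : List α) :
    ∀ k : Nat,
      pyZipNGo ws ((List.range k).map (fun i => ws.drop (i + 1)))
        = (List.range (ws.length - k)).map (fun i => (ws.drop i).take (k + 1)) := by
  induction ws with
  | nil => intro k; simp [pyZipNGo]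
  | cons x xs ih =>
      intro k
      by_cases h : xs.length < k
      · have hempty : ((List.range k).map (fun i => (x :: xs).drop (i + 1))).any (·.isEmpty) = true := by
          rw [List.any_eq_true]
          refine ⟨[], ?_, by simp⟩
          rw [List.mem_map]
          exact ⟨xs.length, by simp [List.mem_range]; omega, by simp⟩
        rw [pyZipNGo, if_pos hempty]
        have : (x :: xs).length - k = 0 := by simp; omega
        rw [this]; simp
      · have h' : k ≤ xs.length := by omega
        have hno : ¬ (((List.range k).map (fun i => (x :: xs).drop (i + 1))).any (·.isEmpty) = true) := by
          rw [List.any_eq_true]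
          rintro ⟨l, hl, hl2⟩
          rw [List.mem_map] at hl
          obtain ⟨i, hi, rfl⟩ := hl
          rw [List.mem_range] at hi
          simp only [List.drop_succ_cons, List.isEmpty_iff, List.drop_eq_nil_iff] at hl2
          omega
        rw [pyZipNGo, if_neg hno]
        -- heads
        have hheads : ((List.range k).map (fun i => (x :: xs).drop (i + 1))).map (·.headI)
            = (List.range k).map (fun i => (xs.drop i).headI) := by
          rw [List.map_map]; apply List.map_congr_left; intro i _; simp
        -- tails
        have htails : ((List.range k).map (fun i => (x :: xs).drop (i + 1))).map (·.tail)
            = (List.range k).map (fun i => xs.drop (i + 1)) := by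
          rw [List.map_map]; apply List.map_congr_left; intro i _
          simp [List.tail_drop]
        rw [hheads, htails, heads_of_shifts xs k h', ih k]
        have hlen : (x :: xs).length - k = (xs.length - k) + 1 := by simp; omega
        rw [hlen, List.range_succ_eq_map, List.map_cons, List.map_map]
        congr 1

-- zip of the k shifted copies ws, ws[1:], …, ws[k-1:] yields the k-windows of ws
lemma zip_shifts {α : Type} [Inhabited α] (ws : List α) (k : Nat) (hk : 1 ≤ k) :
    pyZipN ((List.range k).map (fun i => ws.drop i))
      = (List.range (ws.length + 1 - k)).map (fun i => (ws.drop i).take k) := by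
  obtain ⟨j, rfl⟩ : ∃ j, k = j + 1 := ⟨k - 1, by omega⟩
  have h1 : ∀ i ∈ List.range j,
      ((fun i => ws.drop i) ∘ Nat.succ) i = (fun i => ws.drop (i + 1)) i := by
    intro i _; simp
  rw [List.range_succ_eq_map, List.map_cons, List.map_map, List.drop_zero, pyZipN,
    List.map_congr_left h1, go_shifts ws j,
    show ws.length + 1 - (j + 1) = ws.length - j by omega]

-- A's inner loop over range(a, b) joins the words ws[a:b] with single spaces
lemma inner_fold (ws : List String) (b : Int) :
    ∀ (t : Nat) (a : Int) (acc : String), 0 ≤ a → a + t = b → 1 ≤ t → b ≤ (ws.length : Int) →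
      (PySem.List.pyRange a b 1).foldl (fun c j =>
          if j = b - 1 then c ++ PySem.List.pyGetD ws j ""
          else c ++ PySem.List.pyGetD ws j "" ++ " ") acc
        = acc ++ PySem.Str.join " " ((ws.drop a.toNat).take t) := by
  intro t
  induction t with
  | zero => omega
  | succ u ih =>
      intro a acc ha hab _ hb
      have haIdx : a.toNat < ws.length := by omega
      have hdrop : ws.drop a.toNat = ws[a.toNat] :: ws.drop (a.toNat + 1) :=
        List.drop_eq_getElem_cons haIdx
      have hget : PySem.List.pyGetD ws a "" = ws[a.toNat] := by
        have h := PySem.List.pyGetD_natCast ws a.toNat ""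
        rw [Int.toNat_of_nonneg ha] at h
        rw [h, List.getD_eq_getElem ws "" haIdx]
      rw [PySem.List.pyRange_one_cons (by omega)]
      simp only [List.foldl_cons]
      cases u with
      | zero =>
          -- last word: a = b - 1
          rw [if_pos (by omega), PySem.List.pyRange_one_eq_nil (by omega)]
          simp only [List.foldl_nil]
          rw [hget, hdrop,
            show (ws[a.toNat] :: ws.drop (a.toNat + 1)).take 1 = [ws[a.toNat]] from rfl,
            str_join_singleton]
      | succ v =>
          rw [if_neg (by omega)]
          rw [ih (a + 1) (acc ++ PySem.List.pyGetD ws a "" ++ " ") (by omega) (by omega)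
            (by omega) hb]
          have h1 : (a + 1).toNat = a.toNat + 1 := by omega
          rw [h1, hdrop, List.take_succ_cons, hget]
          have hne : (ws.drop (a.toNat + 1)).take (v + 1) ≠ [] := by
            have : (ws.drop (a.toNat + 1)).length ≥ v + 1 := by
              rw [List.length_drop]; omega
            intro hc
            have := congrArg List.length hc
            simp [List.length_take] at this
            omega
          obtain ⟨y, tl, hy⟩ := List.exists_cons_of_ne_nil hne
          rw [hy, str_join_cons_cons]
          apply String.toList_inj.mp
          simp
lemma word_ngram_eq_windows (ws : List String) (n : Int) (hn : 1 ≤ n) :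
    (PySem.List.pyRange 0 ((ws.length : Int) - n + 1) 1).foldl (fun ngram i =>
        ngram ++ [(PySem.List.pyRange i (i + n) 1).foldl (fun c j =>
          if j = i + n - 1 then c ++ PySem.List.pyGetD ws j ""
          else c ++ PySem.List.pyGetD ws j "" ++ " ") ""]) []
      = (List.range (ws.length + 1 - n.toNat)).map
          (fun i => PySem.Str.join " " ((ws.drop i).take n.toNat)) := by
  rw [PySem.List.foldl_append_singleton_eq_map (fun i =>
    (PySem.List.pyRange i (i + n) 1).foldl (fun c j =>
      if j = i + n - 1 then c ++ PySem.List.pyGetD ws j ""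
      else c ++ PySem.List.pyGetD ws j "" ++ " ") ""), List.nil_append]
  rw [PySem.List.pyRange_one, List.map_map]
  rw [show ((ws.length : Int) - n + 1 - 0).toNat = ws.length + 1 - n.toNat by omega]
  apply List.map_congr_left
  intro idx hidx
  rw [List.mem_range] at hidx
  simp only [Function.comp_apply]
  have hb : ((0 : Int) + idx) + n ≤ (ws.length : Int) := by omega
  rw [inner_fold ws (((0 : Int) + idx) + n) n.toNat ((0 : Int) + idx) "" (by omega) (by omega)
    (by omega) hb]
  rw [str_empty_append, show ((0 : Int) + (idx : Int)).toNat = idx by omega]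

lemma alt_eq_windows (ws : List String) (n : Int) (hn : 1 ≤ n) :
    (pyZipN ((PySem.List.pyRange 0 n 1).map (fun i => PySem.List.slice ws (some i) none))).map
        (fun t => PySem.Str.join " " t)
      = (List.range (ws.length + 1 - n.toNat)).map
          (fun i => PySem.Str.join " " ((ws.drop i).take n.toNat)) := by
  rw [PySem.List.pyRange_one, List.map_map]
  rw [show ((n : Int) - 0).toNat = n.toNat by omega]
  rw [show (List.map ((fun i => PySem.List.slice ws (some i) none) ∘ fun k => (0 : Int) + ↑k)
      (List.range n.toNat)) = (List.range n.toNat).map (fun i => ws.drop i) by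
    apply List.map_congr_left; intro i _
    simp only [Function.comp_apply, zero_add]
    exact PySem.List.slice_from_natCast ws i]
  rw [zip_shifts ws n.toNat (by omega), List.map_map]
  rfl

-- ===== VERDICT (by name: the statement is the Claim_ definition above) =====
theorem word_ngram_spec : Claim_unchanged_word_ngram := by
  intro s n _ hnd
  have hn : 1 ≤ n := by unfold D_word_ngram at hnd; omega
  simp only [word_ngram, word_ngram_alt]
  set sw := (PySem.Str.split? (PySem.Str.replace (PySem.Str.replace s "," "") "." "") " ").getD []
    with hsw
  rw [word_ngram_eq_windows sw n hn]
  by_cases hbig : (sw.length : Int) < n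
  · rw [if_pos hbig, show sw.length + 1 - n.toNat = 0 by omega]
    simp
  · rw [if_neg hbig, alt_eq_windows sw n hn]

theorem word_ngram_changed : Claim_changed_word_ngram := by
  unfold Claim_changed_word_ngram; decide

theorem word_ngram_tight : Claim_exact_word_ngram := by
  intro s n _ hd
  unfold D_word_ngram at hd
  simp only [word_ngram, word_ngram_alt]
  set sw := (PySem.Str.split? (PySem.Str.replace (PySem.Str.replace s "," "") "." "") " ").getD []
    with hsw
  -- B is empty: the length guard does not fire for n ≤ 0, and range(n) is empty
  rw [if_neg (by omega), PySem.List.pyRange_one_eq_nil (a := 0) (b := n) (by omega)]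
  simp only [List.map_nil, pyZipN]
  -- A is non-empty: the outer range has (len sw) - n + 1 ≥ 1 elements
  rw [PySem.List.foldl_append_singleton_eq_map (fun i =>
    (PySem.List.pyRange i (i + n) 1).foldl (fun c j =>
      if j = i + n - 1 then c ++ PySem.List.pyGetD sw j ""
      else c ++ PySem.List.pyGetD sw j "" ++ " ") ""), List.nil_append]
  intro hc
  have hlen := congrArg List.length hc
  rw [List.length_map, PySem.List.length_pyRange_one, List.length_nil] at hlen
  omega
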